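-- pv_equiv track=rewrite | github.com/jonghoonok/Algorithm_Study | D2/D2_1859.py | backward_max
-- ===== SOURCE A (Python) =====
-- def backward_max(numbers):
--     temp_result = []
--     result = [0]
--     temp = 0
--     for i in range(1, len(numbers)):
--         if numbers[-i] >= temp:
--             temp = numbers[-i]
--             temp_result.append(len(numbers) - i)
--     for i in range(1, len(temp_result)+1):
--         result.append(temp_result[-i])
--     return result
-- ===== SOURCE B (Python) =====
-- def backward_max(numbers):
--     n = len(numbers)
--     suf = [0] * n  # suf[j] = max(0, max(numbers[j+1:]))
--     for j in range(n - 2, -1, -1):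
--         suf[j] = max(suf[j + 1], numbers[j + 1])
--     return [0] + [j for j in range(1, n) if numbers[j] >= suf[j]]
-- ===== Notes on version B (the rewrite author's own statement) =====
-- stated objective: alternative
-- what changed: A scans backward with a conditional running max collecting indices in descending order and then reverses them via a second negative-index loop; B instead materialises a suffix-maximum table in one right-to-left pass and emits qualifying indices directly in ascending order with a forward filter, so no reversal pass exists.
import Mathlib
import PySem

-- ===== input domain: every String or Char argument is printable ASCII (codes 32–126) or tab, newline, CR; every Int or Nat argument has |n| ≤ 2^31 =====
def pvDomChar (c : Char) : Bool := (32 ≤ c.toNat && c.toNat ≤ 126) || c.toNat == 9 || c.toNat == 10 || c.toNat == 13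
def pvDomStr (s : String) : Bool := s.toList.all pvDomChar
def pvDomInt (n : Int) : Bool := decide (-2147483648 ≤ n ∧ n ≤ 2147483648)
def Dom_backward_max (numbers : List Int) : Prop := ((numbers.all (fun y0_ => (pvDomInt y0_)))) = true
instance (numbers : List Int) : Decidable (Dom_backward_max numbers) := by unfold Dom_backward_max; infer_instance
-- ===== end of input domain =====

-- B replaces A's backward conditional-running-max pass plus an index-arithmetic reversal pass with a
-- suffix-maximum table built right-to-left and a forward filter emitting indices in ascending order
-- (alternative decomposition, same linear cost).

-- ===== PORT A =====
def backward_max (numbers : List Int) : List Int :=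
  let n : Int := (numbers.length : Int)
  let st := (PySem.List.pyRange 1 n 1).foldl
    (fun (s : List Int × Int) i =>
      if PySem.List.pyGetD numbers (-i) 0 ≥ s.2 then
        (s.1 ++ [n - i], PySem.List.pyGetD numbers (-i) 0)
      else s)
    ([], 0)
  (PySem.List.pyRange 1 ((st.1.length : Int) + 1) 1).foldl
    (fun r i => r ++ [PySem.List.pyGetD st.1 (-i) 0]) [0]

-- ===== PORT B =====
def backward_max_alt (numbers : List Int) : List Int :=
  let n : Int := (numbers.length : Int)
  let suf := (PySem.List.pyRange (n - 2) (-1) (-1)).foldl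
    (fun (a : List Int) j =>
      PySem.List.pySetD a j
        (max (PySem.List.pyGetD a (j + 1) 0) (PySem.List.pyGetD numbers (j + 1) 0)))
    (List.replicate numbers.length 0)
  0 :: (PySem.List.pyRange 1 n 1).filter
    (fun j => decide (PySem.List.pyGetD numbers j 0 ≥ PySem.List.pyGetD suf j 0))

-- ===== PRECONDITION & SPEC =====
def Spec_backward_max (numbers : List Int) (out : List Int) : Prop := out = backward_max_alt numbers
instance (numbers : List Int) (out : List Int) : Decidable (Spec_backward_max numbers out) := by unfold Spec_backward_max; infer_instance

-- ===== CLAIM (what is proved, stated in full; the proofs are below) =====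
def Claim_equal_backward_max : Prop := ∀ (numbers : List Int), Dom_backward_max numbers → Spec_backward_max numbers (backward_max numbers)

-- ===== LEMMAS AND PROOFS =====

-- pvMx0 l = max(0, max(l)): the running maximum A maintains / the table entry B stores.
-- pvIdxs l p = ascending indices p, p+1, … of elements of l that are ≥ pvMx0 of their strict suffix.
def pvMx0 : List Int → Int
  | [] => 0
  | x :: t => max x (pvMx0 t)

def pvIdxs : List Int → Int → List Int
  | [], _ => []
  | x :: t, p => (if pvMx0 t ≤ x then [p] else []) ++ pvIdxs t (p + 1)

lemma pvLoop1 (numbers : List Int) (k : Nat) (hk : k < numbers.length) :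
    (PySem.List.pyRange 1 ((k : Int) + 1) 1).foldl
      (fun (s : List Int × Int) i =>
        if PySem.List.pyGetD numbers (-i) 0 ≥ s.2 then
          (s.1 ++ [(numbers.length : Int) - i], PySem.List.pyGetD numbers (-i) 0)
        else s)
      ([], 0)
    = ((pvIdxs (numbers.drop (numbers.length - k)) ((numbers.length : Int) - (k : Int))).reverse,
       pvMx0 (numbers.drop (numbers.length - k))) := by
  induction k with
  | zero => simp [PySem.List.pyRange_one_eq_nil, pvIdxs, pvMx0]
  | succ k ih =>
      have h1 : (1:Int) ≤ (k:Int) + 1 := by omega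
      rw [show ((k+1:Nat):Int) + 1 = ((k:Int)+1) + 1 by push_cast; ring,
          PySem.List.pyRange_one_succ_right h1, List.foldl_append, ih (by omega)]
      have hneg : -((k:Int)+1) = -(((k+1:Nat)):Int) := by push_cast; ring
      have hget : PySem.List.pyGetD numbers (-((k:Int)+1)) 0
          = numbers[numbers.length - (k+1)] := by
        rw [hneg, PySem.List.pyGetD_neg_natCast _ _ _ (by omega) (by omega)]
      have hdrop : numbers.drop (numbers.length - (k+1))
          = numbers[numbers.length - (k+1)] :: numbers.drop (numbers.length - k) := by
        rw [List.drop_eq_getElem_cons (by omega),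
            show numbers.length - (k+1) + 1 = numbers.length - k from by omega]
      simp only [List.foldl_cons, List.foldl_nil, hget, hdrop, pvIdxs, ge_iff_le]
      have hp : (numbers.length : Int) - ((k:Int)+1) + 1 = (numbers.length : Int) - (k:Int) := by ring
      by_cases hc : pvMx0 (numbers.drop (numbers.length - k)) ≤ numbers[numbers.length - (k+1)]
      · rw [if_pos hc, if_pos hc]
        refine Prod.ext ?_ ?_
        · show _ ++ _ = _
          rw [show ((k+1:Nat):Int) = (k:Int)+1 from by push_cast; ring]
          simp [hp]
        · show _ = max _ _
          simp [max_eq_left hc]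
      · rw [if_neg hc, if_neg hc]
        refine Prod.ext ?_ ?_
        · show _ = List.reverse _
          rw [show ((k+1:Nat):Int) = (k:Int)+1 from by push_cast; ring]
          simp [hp]
        · show _ = max _ _
          simp [max_eq_right (not_le.mp hc).le]

lemma pvLoop2 (tr : List Int) (k : Nat) (hk : k ≤ tr.length) :
    (PySem.List.pyRange 1 ((k : Int) + 1) 1).foldl
      (fun r i => r ++ [PySem.List.pyGetD tr (-i) 0]) [0]
    = 0 :: (tr.drop (tr.length - k)).reverse := by
  induction k with
  | zero => simp [PySem.List.pyRange_one_eq_nil]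
  | succ k ih =>
      have h1 : (1:Int) ≤ (k:Int) + 1 := by omega
      rw [show ((k+1:Nat):Int) + 1 = ((k:Int)+1) + 1 from by push_cast; ring,
          PySem.List.pyRange_one_succ_right h1, List.foldl_append, ih (by omega)]
      have hget : PySem.List.pyGetD tr (-((k:Int)+1)) 0 = tr[tr.length - (k+1)] := by
        rw [show -((k:Int)+1) = -(((k+1:Nat)):Int) from by push_cast; ring,
            PySem.List.pyGetD_neg_natCast _ _ _ (by omega) (by omega)]
      have hdrop : tr.drop (tr.length - (k+1))
          = tr[tr.length - (k+1)] :: tr.drop (tr.length - k) := by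
        rw [List.drop_eq_getElem_cons (by omega),
            show tr.length - (k+1) + 1 = tr.length - k from by omega]
      simp only [List.foldl_cons, List.foldl_nil, hget, hdrop]
      simp

lemma pvA_eq (numbers : List Int) :
    backward_max numbers = 0 :: pvIdxs (numbers.drop 1) 1 := by
  unfold backward_max
  dsimp only
  rcases Nat.eq_zero_or_pos numbers.length with h0 | hpos
  · rw [List.length_eq_zero_iff.mp h0]
    decide
  · have L := pvLoop1 numbers (numbers.length - 1) (by omega)
    rw [show ((numbers.length - 1 : Nat) : Int) + 1 = (numbers.length : Int) from by omega,
        show numbers.length - (numbers.length - 1) = 1 from by omega,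
        show (numbers.length : Int) - ((numbers.length - 1 : Nat) : Int) = 1 from by omega] at L
    rw [L, pvLoop2 _ _ (le_refl _)]
    simp

lemma pvLoop3 (numbers : List Int) (k : Nat) (hk : k < numbers.length) :
    ∀ (a : List Int), a.length = numbers.length →
    (∀ i : Nat, k ≤ i → i < numbers.length →
        PySem.List.pyGetD a (i : Int) 0 = pvMx0 (numbers.drop (i + 1))) →
    ∀ i : Nat, i < numbers.length →
      PySem.List.pyGetD
        ((PySem.List.pyRange ((k : Int) - 1) (-1) (-1)).foldl
          (fun (a : List Int) j =>
            PySem.List.pySetD a j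
              (max (PySem.List.pyGetD a (j + 1) 0) (PySem.List.pyGetD numbers (j + 1) 0))) a)
        (i : Int) 0 = pvMx0 (numbers.drop (i + 1)) := by
  induction k with
  | zero =>
      intro a hlen hinv i hi
      rw [show ((0:Nat):Int) - 1 = -1 from by norm_num,
          PySem.List.pyRange_neg_one_eq_nil (le_refl _)]
      exact hinv i (Nat.zero_le _) hi
  | succ k ih =>
      intro a hlen hinv i hi
      rw [show ((k+1:Nat):Int) - 1 = (k:Int) from by push_cast; ring,
          PySem.List.pyRange_neg_one_cons (by omega : (-1:Int) < (k:Int)), List.foldl_cons]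
      refine ih (by omega) _ (by rw [PySem.List.length_pySetD]; exact hlen) ?_ i hi
      intro m hm hmn
      rw [show ((k:Int)) + 1 = ((k+1:Nat):Int) from by push_cast; ring,
          PySem.List.pyGetD_pySetD_natCast a k m _ 0 (by omega)]
      by_cases hmk : m = k
      · subst hmk
        rw [if_pos rfl, hinv (m+1) (by omega) (by omega),
            PySem.List.pyGetD_natCast, List.getD_eq_getElem _ _ (by omega),
            List.drop_eq_getElem_cons (show m + 1 < numbers.length from by omega)]
        simp [pvMx0, max_comm]
      · rw [if_neg hmk]
        exact hinv m (by omega) hmn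

lemma pvFilt (numbers suf : List Int)
    (hs : ∀ i : Nat, i < numbers.length →
        PySem.List.pyGetD suf (i : Int) 0 = pvMx0 (numbers.drop (i + 1))) :
    ∀ (m a : Nat), a + m = numbers.length →
      (PySem.List.pyRange (a : Int) (numbers.length : Int) 1).filter
        (fun j => decide (PySem.List.pyGetD numbers j 0 ≥ PySem.List.pyGetD suf j 0))
      = pvIdxs (numbers.drop a) (a : Int) := by
  intro m
  induction m with
  | zero =>
      intro a ha
      rw [show a = numbers.length from by omega]
      simp [PySem.List.pyRange_one_eq_nil, pvIdxs]
  | succ m ih =>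
      intro a ha
      rw [PySem.List.pyRange_one_cons (by omega : (a:Int) < (numbers.length:Int)),
          List.filter_cons]
      have hga : PySem.List.pyGetD numbers (a:Int) 0 = numbers[a]'(by omega) := by
        rw [PySem.List.pyGetD_natCast, List.getD_eq_getElem _ _ (by omega)]
      have hdrop : numbers.drop a = numbers[a]'(by omega) :: numbers.drop (a+1) :=
        List.drop_eq_getElem_cons (by omega)
      rw [show ((a:Int)) + 1 = ((a+1:Nat):Int) from by push_cast; ring, ih (a+1) (by omega),
          hdrop]
      simp only [pvIdxs, hga, hs a (by omega), ge_iff_le,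
          show ((a+1:Nat):Int) = (a:Int) + 1 from by push_cast; ring]
      by_cases hc : pvMx0 (numbers.drop (a+1)) ≤ numbers[a]'(by omega)
      · simp [hc]
      · simp [hc]

lemma pvB_eq (numbers : List Int) :
    backward_max_alt numbers = 0 :: pvIdxs (numbers.drop 1) 1 := by
  unfold backward_max_alt
  dsimp only
  rcases Nat.eq_zero_or_pos numbers.length with h0 | hpos
  · rw [List.length_eq_zero_iff.mp h0]
    decide
  · have H := pvLoop3 numbers (numbers.length - 1) (by omega)
      (List.replicate numbers.length 0) (by simp)
      (by
        intro i h1 h2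
        have hi : i + 1 = numbers.length := by omega
        rw [PySem.List.pyGetD_natCast, List.getD_eq_getElem _ _ (by simp; omega),
            hi, List.drop_length]
        simp [pvMx0])
    rw [show ((numbers.length - 1 : Nat) : Int) - 1 = (numbers.length : Int) - 2 from by
          omega] at H
    have F := pvFilt numbers _ H (numbers.length - 1) 1 (by omega)
    norm_num at F
    rw [F]
    rw [List.drop_one]

-- ===== VERDICT (by name: the statement is the Claim_ definition above) =====
theorem backward_max_spec : Claim_equal_backward_max := by
  intro numbers _
  unfold Spec_backward_max
  rw [pvA_eq, pvB_eq]
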